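-- pv_equiv track=rewrite | github.com/edwcrtn/new-doss-othello | DERNIERE_VERSION.py | recursifw
-- ===== SOURCE A (Python) =====
-- bordg=[0,8,16,24,32,40,48,56]     #bord gauche
--
-- bordd=[7,15,23,31,39,47,55,63]      #bord droit
--
-- def recursifw(lb,lw,cp,i,j,a,b):                                  #meme principe mais pour les blancs
--     if i+j*(a-2) in bordd:
--         if j in [-7,+1,+9]:
--             return None
--     if i+j*(a-2) in bordg:
--         if j in [-9,-1,+7]:
--             return None
--     if i+j*b in lb:
--         if i+j*a not in cp:
--             if i+j*a not in lw:
--                 if i+j*a not in lb: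
--                     if i+j*b in bordd:
--                         if j in [-7,+1,+9]:
--                             return None
--                     if i+j*b in bordg:
--                         if j in [-9,-1,+7]:
--                             return None
--                     return i+j*a
--     if i+j*b in lb:
--         if i+j*a not in cp:
--             if i+j*a not in lw:
--                 if i+j*a in lb:
--                     a+=1
--                     b+=1
--                     return(recursifw(lb,lw,cp,i,j,a,b))
-- ===== SOURCE B (Python) =====
-- def recursifw(lb, lw, cp, i, j, a, b):
--     # Iterative rewrite: the border lists are replaced by modulo-8 arithmetic
--     # (x is on the right border iff 0 <= x <= 63 and x % 8 == 7, left border iff x % 8 == 0),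
--     # and the pieces are kept in sets; one early-return guard chain per step.
--     black, white, corners = set(lb), set(lw), set(cp)
--
--     def edge_cut(x):
--         return 0 <= x <= 63 and ((x % 8 == 7 and j in (-7, 1, 9)) or
--                                  (x % 8 == 0 and j in (-9, -1, 7)))
--
--     while True:
--         prev, cur, nxt = i + j * (a - 2), i + j * b, i + j * a
--         if edge_cut(prev):
--             return None
--         if cur not in black or nxt in corners or nxt in white:
--             return None
--         if nxt not in black:
--             return None if edge_cut(cur) else nxt
--         a += 1
--         b += 1
-- ===== Notes on version B (the rewrite author's own statement) =====
-- stated objective: alternative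
-- what changed: Replaces the tail recursion by a while loop over set-based piece lookups and eliminates the two hard-coded border lists entirely, deciding border membership by modulo-8 arithmetic (x%8==7 / x%8==0 within 0..63) in one shared edge_cut helper.
import Mathlib
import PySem

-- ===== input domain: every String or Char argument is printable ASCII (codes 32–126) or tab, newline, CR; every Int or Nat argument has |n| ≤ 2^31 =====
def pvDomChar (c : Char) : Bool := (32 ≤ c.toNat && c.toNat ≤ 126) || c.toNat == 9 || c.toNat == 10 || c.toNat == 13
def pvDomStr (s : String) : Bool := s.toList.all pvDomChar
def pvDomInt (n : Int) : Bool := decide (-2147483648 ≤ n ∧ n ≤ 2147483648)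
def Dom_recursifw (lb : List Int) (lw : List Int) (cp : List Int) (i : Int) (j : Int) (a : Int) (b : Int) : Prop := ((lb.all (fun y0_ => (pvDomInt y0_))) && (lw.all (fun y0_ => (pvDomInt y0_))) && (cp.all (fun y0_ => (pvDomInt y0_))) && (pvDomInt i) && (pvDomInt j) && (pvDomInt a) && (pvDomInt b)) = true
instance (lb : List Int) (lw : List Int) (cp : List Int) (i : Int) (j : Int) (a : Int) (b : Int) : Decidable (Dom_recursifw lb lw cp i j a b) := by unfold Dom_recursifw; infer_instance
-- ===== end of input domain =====

-- B replaces A's tail recursion by a while loop over set-based lookups and replaces the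
-- hard-coded border lists by modulo-8 arithmetic (alternative decomposition, same behaviour);
-- equivalence claimed on Pre_ (excludes the j = 0 inputs on which both programs never terminate).


-- ===== PORT A =====
def bordg : List Int := [0,8,16,24,32,40,48,56]
def bordd : List Int := [7,15,23,31,39,47,55,63]

-- Literal port of A's recursion; the fuel argument (lb.length + 1) is only a totality guard:
-- on every input admitted by Pre_ the Python recursion stops within that many calls
-- (each recursive step needs a fresh value i+j*a ∈ lb, and with j ≠ 0 those values are distinct).
-- The Python function's first block may return or fall through to the second identical guard chain;
-- fall-through is modelled by Option (Option Int): some r = "return r", none = fall through.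
def recursifwFuel (lb : List Int) (lw : List Int) (cp : List Int) (i : Int) (j : Int) :
    Nat → Int → Int → Option Int
  | 0, _, _ => none
  | n+1, a, b =>
    if (i+j*(a-2) ∈ bordd) ∧ j ∈ ([-7,1,9] : List Int) then none
    else if (i+j*(a-2) ∈ bordg) ∧ j ∈ ([-9,-1,7] : List Int) then none
    else
      let r1 : Option (Option Int) :=
        if i+j*b ∈ lb then
          if i+j*a ∉ cp then
            if i+j*a ∉ lw then
              if i+j*a ∉ lb then
                if (i+j*b ∈ bordd) ∧ j ∈ ([-7,1,9] : List Int) then some none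
                else if (i+j*b ∈ bordg) ∧ j ∈ ([-9,-1,7] : List Int) then some none
                else some (some (i+j*a))
              else none
            else none
          else none
        else none
      match r1 with
      | some r => r
      | none =>
        if i+j*b ∈ lb then
          if i+j*a ∉ cp then
            if i+j*a ∉ lw then
              if i+j*a ∈ lb then recursifwFuel lb lw cp i j n (a+1) (b+1)
              else none
            else none
          else none
        else none

def recursifw (lb : List Int) (lw : List Int) (cp : List Int) (i : Int) (j : Int) (a : Int) (b : Int) : Option Int :=
  recursifwFuel lb lw cp i j (lb.length + 1) a b

-- ===== PORT B =====
-- Source B's edge_cut helper; Python's x % 8 equals Lean's Int.emod '%' exactly here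
-- because the divisor 8 is positive (both yield the representative in [0, 8)).
def edgeCut (j x : Int) : Bool :=
  decide (0 ≤ x) && decide (x ≤ 63) &&
  ((decide (x % 8 = 7) && (j == -7 || j == 1 || j == 9)) ||
   (decide (x % 8 = 0) && (j == -9 || j == -1 || j == 7)))

-- Source B's while-True body; the same fuel bound (lb.length + 1) replaces 'while True'
-- as a totality guard.
def recursifwLoop (black white corners : PySem.Set Int) (i j : Int) :
    Nat → Int → Int → Option Int
  | 0, _, _ => none
  | n+1, a, b =>
    let prev := i + j*(a-2)
    let cur := i + j*b
    let nxt := i + j*a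
    if edgeCut j prev then none
    else if ¬ PySem.Set.contains black cur ∨ PySem.Set.contains corners nxt ∨ PySem.Set.contains white nxt then none
    else if ¬ PySem.Set.contains black nxt then
      (if edgeCut j cur then none else some nxt)
    else recursifwLoop black white corners i j n (a+1) (b+1)

def recursifw_alt (lb : List Int) (lw : List Int) (cp : List Int) (i : Int) (j : Int) (a : Int) (b : Int) : Option Int :=
  recursifwLoop (PySem.Set.ofList lb) (PySem.Set.ofList lw) (PySem.Set.ofList cp) i j (lb.length + 1) a b

-- ===== PRECONDITION & SPEC =====
-- Pre_ excludes exactly the inputs on which Python A recurses forever (RecursionError):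
-- j = 0 with i an opponent piece not flanked (i ∈ lb, i ∉ cp, i ∉ lw).
def Pre_recursifw (lb : List Int) (lw : List Int) (cp : List Int) (i : Int) (j : Int) (a : Int) (b : Int) : Prop :=
  ¬ (j = 0 ∧ i ∈ lb ∧ i ∉ cp ∧ i ∉ lw)
instance (lb : List Int) (lw : List Int) (cp : List Int) (i : Int) (j : Int) (a : Int) (b : Int) : Decidable (Pre_recursifw lb lw cp i j a b) := by unfold Pre_recursifw; infer_instance
def pvWitness_recursifw : List Int × List Int × List Int × Int × Int × Int × Int := ([18], [], [], 17, 1, 2, 1)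

def Spec_recursifw (lb : List Int) (lw : List Int) (cp : List Int) (i : Int) (j : Int) (a : Int) (b : Int) (out : Option Int) : Prop := out = recursifw_alt lb lw cp i j a b
instance (lb : List Int) (lw : List Int) (cp : List Int) (i : Int) (j : Int) (a : Int) (b : Int) (out : Option Int) : Decidable (Spec_recursifw lb lw cp i j a b out) := by unfold Spec_recursifw; infer_instance

-- ===== CLAIM =====
def Claim_equal_recursifw : Prop := ∀ (lb : List Int) (lw : List Int) (cp : List Int) (i : Int) (j : Int) (a : Int) (b : Int), Dom_recursifw lb lw cp i j a b → Pre_recursifw lb lw cp i j a b → Spec_recursifw lb lw cp i j a b (recursifw lb lw cp i j a b)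

-- ===== LEMMAS AND PROOFS =====
theorem edgeCut_right (j x : Int) :
    (edgeCut j x = true) ↔ ((x ∈ bordd ∧ j ∈ ([-7,1,9] : List Int)) ∨ (x ∈ bordg ∧ j ∈ ([-9,-1,7] : List Int))) := by
  simp only [edgeCut, bordd, bordg, List.mem_cons, List.not_mem_nil, or_false,
    Bool.and_eq_true, Bool.or_eq_true, decide_eq_true_eq, beq_iff_eq]
  constructor
  · rintro ⟨⟨h0, h63⟩, h | h⟩
    · exact Or.inl ⟨by omega, by omega⟩
    · exact Or.inr ⟨by omega, by omega⟩
  · rintro (⟨hx, hj⟩ | ⟨hx, hj⟩)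
    · exact ⟨⟨by omega, by omega⟩, Or.inl ⟨by omega, by omega⟩⟩
    · exact ⟨⟨by omega, by omega⟩, Or.inr ⟨by omega, by omega⟩⟩

theorem fuel_eq (lb lw cp : List Int) (i j : Int) :
    ∀ n a b, recursifwFuel lb lw cp i j n a b =
      recursifwLoop (PySem.Set.ofList lb) (PySem.Set.ofList lw) (PySem.Set.ofList cp) i j n a b := by
  intro n
  induction n with
  | zero => intro a b; rfl
  | succ n ih =>
    intro a b
    simp only [recursifwFuel, recursifwLoop, PySem.Set.contains_iff, PySem.Set.mem_ofList,
      edgeCut_right]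
    by_cases h1 : (i+j*(a-2) ∈ bordd) ∧ j ∈ ([-7,1,9] : List Int) <;>
    by_cases h2 : (i+j*(a-2) ∈ bordg) ∧ j ∈ ([-9,-1,7] : List Int) <;>
    by_cases h3 : i+j*b ∈ lb <;>
    by_cases h4 : i+j*a ∈ cp <;>
    by_cases h5 : i+j*a ∈ lw <;>
    by_cases h6 : i+j*a ∈ lb <;>
    by_cases h7 : (i+j*b ∈ bordd) ∧ j ∈ ([-7,1,9] : List Int) <;>
    by_cases h8 : (i+j*b ∈ bordg) ∧ j ∈ ([-9,-1,7] : List Int) <;>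
    simp [h1, h2, h3, h4, h5, h6, h7, h8, ih] <;>
      (try (split_ifs <;> simp_all <;> tauto))

-- ===== VERDICT =====
theorem recursifw_spec : Claim_equal_recursifw := by
  intro lb lw cp i j a b _ _
  unfold Spec_recursifw recursifw recursifw_alt
  exact fuel_eq lb lw cp i j _ a b
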